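-- pv_equiv track=rewrite | github.com/pypi-data/pypi-mirror-324 | packages/wrangle-in-py/wrangle_in_py-0.0.4.tar.gz/wrangle_in_py-0.0.4/src/wrangle_in_py/column_name_standardizer.py | resulting_duplicates
-- ===== SOURCE A (Python) =====
-- from collections import defaultdict
--
-- def resulting_duplicates(original_strings, standardized_strings):
--     """
--     Identifies which strings became duplicates after standardization.
--
--     Parameters
--     ----------
--     original_strings : list of str
--         List of strings before standardization.
--
--     standardized_strings : list of str
--         List of strings after standardization.
--
--     Raises
--     ------
--     ValueError :
--         If the inputs original_strings and standardized_strings are not the same length.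
--
--     TypeError :
--         If either of the inputs, original_strings or standardized_strings,
--         are not a list of strings.
--
--     Returns
--     -------
--     dict :
--         A dictionary where the keys are the standardized strings with duplicate(s),
--         and the values are lists of the original strings that map to them.
--
--     Examples
--     --------
--     >>> strings_before = ['Jack Fruit 88.', "Jack!Fruit!88!", "PINEAPPLES"]
--     >>> strings_after = ["jack_fruit_88_", "jack_fruit_88_", "pineapples"]
--     >>> identify_duplicates(strings_before, strings_after)
--     {'jack_fruit_88_': ['Jack Fruit 88.', 'Jack!Fruit!88!']}
--     """
--     # check if original_strings is a list of strings
--     if not isinstance(original_strings, list) or not all(isinstance(element, str) for element in original_strings):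
--         raise TypeError("original_strings must be a list of strings.")
--
--     # check if standardized_strings is a list of strings
--     if not isinstance(standardized_strings, list) or not all(isinstance(element, str) for element in standardized_strings):
--         raise TypeError("standardized_strings must be a list of strings.")
--
--     # check if original_strings and standardized_strings are the same length
--     if len(original_strings) != len(standardized_strings):
--         raise ValueError("Both inputs must be of the same length.")
--
--     # Map standardized names to original names
--     duplicates = defaultdict(list)
--
--     for orig, std in zip(original_strings, standardized_strings):
--         duplicates[std].append(orig)
--
--     # Filter to keep only those with multiple original columns mapping to the same standardized name
--     duplicates = {key: value for key, value in duplicates.items() if len(value) > 1}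
--
--     return duplicates
-- ===== SOURCE B (Python) =====
-- def resulting_duplicates(original_strings, standardized_strings):
--     # check if original_strings is a list of strings
--     if not isinstance(original_strings, list) or not all(isinstance(element, str) for element in original_strings):
--         raise TypeError("original_strings must be a list of strings.")
--
--     # check if standardized_strings is a list of strings
--     if not isinstance(standardized_strings, list) or not all(isinstance(element, str) for element in standardized_strings):
--         raise TypeError("standardized_strings must be a list of strings.")
--
--     # check if original_strings and standardized_strings are the same length
--     if len(original_strings) != len(standardized_strings):
--         raise ValueError("Both inputs must be of the same length.")
--
--     # No grouping dict at all: walk the DISTINCT standardized names in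
--     # first-occurrence order and gather each group by a fresh scan of the pairs.
--     result = {}
--     for std in dict.fromkeys(standardized_strings):
--         group = [orig for orig, s in zip(original_strings, standardized_strings) if s == std]
--         if len(group) > 1:
--             result[std] = group
--     return result
-- ===== Notes on version B (the rewrite author's own statement) =====
-- stated objective: alternative
-- what changed: B keeps no grouping dict at all: it walks the distinct standardized names in first-occurrence order (dict.fromkeys) and gathers each group by a fresh scan of the zipped pairs, keeping groups of size > 1; A builds a defaultdict of every group in one pass and then filters it.
import Mathlib
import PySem

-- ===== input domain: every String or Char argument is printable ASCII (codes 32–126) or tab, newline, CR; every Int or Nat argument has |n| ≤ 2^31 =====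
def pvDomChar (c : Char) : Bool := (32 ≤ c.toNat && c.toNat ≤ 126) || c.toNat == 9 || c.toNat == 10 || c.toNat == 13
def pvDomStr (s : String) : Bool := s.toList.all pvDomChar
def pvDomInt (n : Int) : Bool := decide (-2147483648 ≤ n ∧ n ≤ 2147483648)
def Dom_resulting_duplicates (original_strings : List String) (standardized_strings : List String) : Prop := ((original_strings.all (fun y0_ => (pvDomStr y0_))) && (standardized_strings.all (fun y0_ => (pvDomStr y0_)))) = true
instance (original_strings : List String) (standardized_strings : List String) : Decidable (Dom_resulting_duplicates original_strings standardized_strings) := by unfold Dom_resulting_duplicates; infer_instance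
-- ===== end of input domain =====

-- B drops the grouping dict: it walks the distinct standardized names in first-occurrence order and gathers each group by a fresh scan, keeping groups of size > 1 (alternative decomposition; not faster).


-- ===== PORT A =====
-- (the two isinstance checks always pass under the List String typing)
def resulting_duplicates (original_strings : List String) (standardized_strings : List String) : List (String × List String) :=
  -- duplicates = defaultdict(list); for orig, std in zip(...): duplicates[std].append(orig)
  let duplicates : PySem.Dict String (List String) :=
    (original_strings.zip standardized_strings).foldl
      (fun d p => d.modify p.2 [] (· ++ [p.1])) PySem.Dict.empty
  -- {key: value for key, value in duplicates.items() if len(value) > 1}: the keys of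
  -- duplicates are distinct, so on the association list the comprehension is exactly a
  -- filter of the items in iteration order (hand-ported, exact)
  duplicates.items.filter (fun kv => kv.2.length > 1)

-- ===== PORT B =====
def resulting_duplicates_alt (original_strings : List String) (standardized_strings : List String) : List (String × List String) :=
  -- result = {}; for std in dict.fromkeys(standardized_strings): …
  let result : PySem.Dict String (List String) :=
    (PySem.List.dedup standardized_strings).foldl
      (fun d std =>
        -- group = [orig for orig, s in zip(...) if s == std]
        let group := ((original_strings.zip standardized_strings).filter
          (fun p => p.2 == std)).map (·.1)
        if group.length > 1 then d.insert std group else d)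
      PySem.Dict.empty
  result.items

-- ===== PRECONDITION & SPEC =====
-- Pre_ excludes exactly the inputs where A raises ValueError: lists of different lengths.
def Pre_resulting_duplicates (original_strings : List String) (standardized_strings : List String) : Prop :=
  original_strings.length = standardized_strings.length
instance (original_strings : List String) (standardized_strings : List String) : Decidable (Pre_resulting_duplicates original_strings standardized_strings) := by unfold Pre_resulting_duplicates; infer_instance
def pvWitness_resulting_duplicates : List String × List String := (["Jack Fruit 88.", "Jack!Fruit!88!", "PINEAPPLES"], ["jack_fruit_88_", "jack_fruit_88_", "pineapples"])
def Spec_resulting_duplicates (original_strings : List String) (standardized_strings : List String) (out : List (String × List String)) : Prop := out = resulting_duplicates_alt original_strings standardized_strings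
instance (original_strings : List String) (standardized_strings : List String) (out : List (String × List String)) : Decidable (Spec_resulting_duplicates original_strings standardized_strings out) := by unfold Spec_resulting_duplicates; infer_instance

-- ===== CLAIM =====
def Claim_equal_resulting_duplicates : Prop := ∀ (original_strings : List String) (standardized_strings : List String), Dom_resulting_duplicates original_strings standardized_strings → Pre_resulting_duplicates original_strings standardized_strings → Spec_resulting_duplicates original_strings standardized_strings (resulting_duplicates original_strings standardized_strings)

-- ===== LEMMAS AND PROOFS =====

-- a dict with distinct keys is exactly its key list paired with its getD values
theorem pv_items_eq_keys_map (d : PySem.Dict String (List String)) (hd : d.keys.Nodup) :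
    d.items = d.keys.map (fun k => (k, d.getD k [])) := by
  have h1 : d.keys.map (fun k => (k, d.getD k []))
      = d.items.map (fun p => (p.1, d.getD p.1 [])) := by
    simp only [PySem.Dict.keys, List.map_map]; rfl
  have h2 : d.items.map (fun p => (p.1, d.getD p.1 [])) = d.items.map id := by
    apply List.map_congr_left
    intro p hp
    have := PySem.Dict.getD_of_mem_items (k := p.1) (v := p.2) (d := d)
      (by simpa using hp) hd ([] : List String)
    simp [this]
  rw [h1, h2, List.map_id]

-- the group gathered by a swapped-pairs scan is B's per-key gather
theorem pv_group_eq (l : List (String × String)) (k : String) :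
    ((l.map Prod.swap).filter (fun p => p.1 == k)).map (·.2)
      = (l.filter (fun p => p.2 == k)).map (·.1) := by
  rw [List.filter_map, List.map_map]
  rfl

-- ===== VERDICT =====
theorem resulting_duplicates_spec : Claim_equal_resulting_duplicates := by
  intro os ss _ hpre
  unfold Spec_resulting_duplicates resulting_duplicates resulting_duplicates_alt
  set l := os.zip ss with hl
  set G : String → List String := fun k => (l.filter (fun p => p.2 == k)).map (·.1) with hG
  -- A's dict: distinct keys
  set dA : PySem.Dict String (List String) :=
    l.foldl (fun d p => d.modify p.2 [] (· ++ [p.1])) PySem.Dict.empty with hdA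
  have hnd : dA.keys.Nodup := by
    rw [hdA]
    exact PySem.Dict.nodup_keys_foldl_modify_key l (fun p => p.2) [] (fun _ p => (· ++ [p.1]))
      PySem.Dict.empty PySem.Dict.nodup_keys_empty
  -- A's key list is the ordered dedup of ss
  have hsnd : l.map Prod.snd = ss := List.map_snd_zip (le_of_eq hpre.symm)
  have hkeys : dA.keys = PySem.List.dedup ss := by
    rw [hdA]
    rw [PySem.Dict.keys_foldl_modify_key l (fun p => p.2) [] (fun _ p => (· ++ [p.1]))
      PySem.Dict.empty]
    rw [PySem.Dict.keys_empty]
    show PySem.Set.update [] (l.map Prod.snd) = PySem.List.dedup ss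
    rw [hsnd]
    simp [PySem.Set.update, PySem.Set.ofList_eq_foldl]
  -- A's value at each key is B's gathered group
  have hget : ∀ k, dA.getD k [] = G k := by
    intro k
    have hswap : dA = (l.map Prod.swap).foldl
        (fun d p => d.modify p.1 [] (· ++ [p.2])) PySem.Dict.empty := by
      rw [hdA, List.foldl_map]; rfl
    rw [hswap, PySem.Dict.getD_foldl_modify_append, PySem.Dict.getD_empty, List.nil_append,
      hG, pv_group_eq]
  -- so A's items are the dedup keys paired with their groups
  have hitems : dA.items = (PySem.List.dedup ss).map (fun k => (k, G k)) := by
    rw [pv_items_eq_keys_map dA hnd, hkeys]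
    exact List.map_congr_left (fun k _ => by rw [hget])
  simp only []  -- zeta-reduce the ported lets
  -- A's result: filter the map = map the filtered keys
  rw [hitems, List.filter_map]
  -- B's loop: a guarded insert over fresh distinct keys appends exactly those pairs
  have hBfun : (fun (d : PySem.Dict String (List String)) (std : String) =>
        let group := (l.filter (fun p => p.2 == std)).map (·.1)
        if group.length > 1 then d.insert std group else d)
      = fun d std => if (G std).length > 1 then d.insert std (G std) else d := by
    funext d std; rw [hG]
  rw [hBfun, PySem.List.foldl_ite_eq_foldl_filter]
  rw [PySem.Dict.items_foldl_insert_fresh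
    (l := (PySem.List.dedup ss).filter (fun x => decide ((G x).length > 1)))
    (k := fun a => a) (v := fun a => G a)
    (d := PySem.Dict.empty)
    (fun a _ => PySem.Dict.contains_empty a)
    (by simpa using ((PySem.List.nodup_dedup ss).filter _))]
  rfl
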